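-- pv_equiv track=rewrite | github.com/tonmoy50/Indiana-University | Fall 2023/B551/Assignment1/place_turrets.py | is_conflict_left
-- ===== SOURCE A (Python) =====
-- def is_conflict_left(castle_map, turret_position):
--     i = turret_position[1] - 1
--     while i >= 0:
--         if castle_map[turret_position[0]][i] == "p":
--             return True
--         elif castle_map[turret_position[0]][i] in "X@":
--             return False
--         i -= 1
--     return False
-- ===== SOURCE B (Python) =====
-- def is_conflict_left(castle_map, turret_position):
--     r, c = turret_position
--     if c <= 0:
--         return False
--     seg = castle_map[r][:c]
--     return seg.rfind("p") > max(seg.rfind("X"), seg.rfind("@"))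
-- ===== Notes on version B (the rewrite author's own statement) =====
-- stated objective: idiomatic
-- what changed: Replaces A's cell-by-cell leftward while-loop with early exit by slicing the left segment row[:c] and comparing the rightmost occurrence index of 'p' (str.rfind) against the rightmost blocker index max(rfind('X'), rfind('@')).
import Mathlib
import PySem

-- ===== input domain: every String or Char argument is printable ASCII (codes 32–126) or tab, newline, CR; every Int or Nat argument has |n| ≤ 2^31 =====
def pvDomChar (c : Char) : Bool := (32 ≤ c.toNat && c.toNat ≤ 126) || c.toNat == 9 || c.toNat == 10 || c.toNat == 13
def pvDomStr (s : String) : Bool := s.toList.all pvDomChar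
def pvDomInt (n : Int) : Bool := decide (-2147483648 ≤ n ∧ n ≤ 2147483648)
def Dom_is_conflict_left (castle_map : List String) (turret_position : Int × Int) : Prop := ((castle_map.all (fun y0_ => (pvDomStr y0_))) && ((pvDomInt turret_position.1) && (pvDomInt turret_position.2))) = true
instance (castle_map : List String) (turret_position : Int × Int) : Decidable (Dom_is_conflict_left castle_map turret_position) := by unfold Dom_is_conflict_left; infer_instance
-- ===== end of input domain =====

-- B replaces A's cell-by-cell leftward early-exit scan by slicing the left segment and comparing
-- the rightmost occurrence indices of 'p' and of the blockers 'X'/'@' (str.rfind): simpler/idiomatic.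

-- ===== PORT A =====
-- the while-loop of A: scan index i leftwards; false where Python raises IndexError (outside Pre_)
def isCL_go (castle_map : List String) (r : Int) (i : Int) : Bool :=
  if _h : 0 ≤ i then
    match PySem.List.pyGet? castle_map r with
    | none => false   -- castle_map[r] IndexError (outside Pre_)
    | some row =>
      match PySem.Str.pyGet? row i with
      | none => false -- row[i] IndexError (outside Pre_)
      | some ch =>
        if ch = 'p' then true
        else if ch = 'X' ∨ ch = '@' then false
        else isCL_go castle_map r (i - 1)
  else false
termination_by (i + 1).toNat
decreasing_by omega

def is_conflict_left (castle_map : List String) (turret_position : Int × Int) : Bool :=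
  isCL_go castle_map turret_position.1 (turret_position.2 - 1)

-- ===== PORT B =====
def is_conflict_left_alt (castle_map : List String) (turret_position : Int × Int) : Bool :=
  if turret_position.2 ≤ 0 then false
  else
    match PySem.List.pyGet? castle_map turret_position.1 with
    | none => false   -- castle_map[r] IndexError (outside Pre_)
    | some row =>
      -- seg = castle_map[r][:c]
      let seg := PySem.List.slice row.toList none (some turret_position.2)
      decide (PySem.Chars.rfind seg ['p'] > max (PySem.Chars.rfind seg ['X']) (PySem.Chars.rfind seg ['@']))

-- ===== PRECONDITION & SPEC =====
-- Pre_ excludes exactly the inputs where A raises IndexError: a column ≥ 1 with an invalid row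
-- index, or a column exceeding the row's length (A's first access is at the largest index).
def Pre_is_conflict_left (castle_map : List String) (turret_position : Int × Int) : Prop :=
  turret_position.2 ≤ 0 ∨
    (PySem.Raise.InRange castle_map.length turret_position.1 ∧
      turret_position.2 ≤ ((PySem.List.pyGetD castle_map turret_position.1 "").toList.length : Int))
instance (castle_map : List String) (turret_position : Int × Int) : Decidable (Pre_is_conflict_left castle_map turret_position) := by unfold Pre_is_conflict_left; infer_instance

def pvWitness_is_conflict_left : List String × (Int × Int) := (["p.T", "X@"], (0, 2))

def Spec_is_conflict_left (castle_map : List String) (turret_position : Int × Int) (out : Bool) : Prop := out = is_conflict_left_alt castle_map turret_position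
instance (castle_map : List String) (turret_position : Int × Int) (out : Bool) : Decidable (Spec_is_conflict_left castle_map turret_position out) := by unfold Spec_is_conflict_left; infer_instance

-- ===== CLAIM (what is proved, stated in full; the proofs are below) =====
def Claim_equal_is_conflict_left : Prop := ∀ (castle_map : List String) (turret_position : Int × Int), Dom_is_conflict_left castle_map turret_position → Pre_is_conflict_left castle_map turret_position → Spec_is_conflict_left castle_map turret_position (is_conflict_left castle_map turret_position)

-- ===== LEMMAS AND PROOFS =====

lemma rfind_go_zero (s sub : List Char) :
    PySem.Chars.rfind.go s sub 0 = if sub.isPrefixOf s then 0 else -1 := by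
  simp [PySem.Chars.rfind.go]

lemma rfind_go_succ (s sub : List Char) (j : Nat) :
    PySem.Chars.rfind.go s sub (j + 1) =
      if sub.isPrefixOf (s.drop (j + 1)) then ((j : Int) + 1) else PySem.Chars.rfind.go s sub j := by
  rw [PySem.Chars.rfind.go]; push_cast; rfl

lemma isPrefixOf_singleton (c : Char) (t : List Char) :
    [c].isPrefixOf t = (t[0]? == some c) := by
  cases t with
  | nil => rfl
  | cons a t => simp [List.isPrefixOf, BEq.comm]

lemma rfind_go_snoc (xs : List Char) (a c : Char) (k : Nat) (hk : k < xs.length) :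
    PySem.Chars.rfind.go (xs ++ [a]) [c] k = PySem.Chars.rfind.go xs [c] k := by
  induction k with
  | zero =>
    rw [rfind_go_zero, rfind_go_zero, isPrefixOf_singleton, isPrefixOf_singleton,
      List.getElem?_append_left (by omega)]
  | succ j ih =>
    rw [rfind_go_succ, rfind_go_succ, isPrefixOf_singleton, isPrefixOf_singleton,
      List.getElem?_drop, List.getElem?_drop, List.getElem?_append_left (by omega),
      ih (by omega)]

lemma rfind_nil (c : Char) : PySem.Chars.rfind [] [c] = -1 := by
  unfold PySem.Chars.rfind
  rw [List.length_nil, rfind_go_zero]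
  simp

lemma rfind_snoc (xs : List Char) (a c : Char) :
    PySem.Chars.rfind (xs ++ [a]) [c] =
      if a = c then (xs.length : Int) else PySem.Chars.rfind xs [c] := by
  unfold PySem.Chars.rfind
  have hlen : (xs ++ [a]).length = xs.length + 1 := by simp
  rw [hlen, rfind_go_succ]
  have h1 : (xs ++ [a]).drop (xs.length + 1) = [] := by
    apply List.drop_eq_nil_of_le; simp
  rw [h1, isPrefixOf_singleton]
  rw [show ((List.nil (α := Char))[0]? == some c) = false from rfl]
  simp only [Bool.false_eq_true, if_false]
  cases hL : xs.length with
  | zero =>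
    have hxs : xs = [] := List.eq_nil_of_length_eq_zero hL
    subst hxs
    rw [rfind_go_zero, rfind_go_zero, isPrefixOf_singleton, isPrefixOf_singleton]
    rw [show ((List.nil (α := Char))[0]? == some c) = false from rfl]
    simp only [List.nil_append, Bool.false_eq_true, if_false]
    by_cases hac : a = c
    · have ht : (([a][0]?) == some c) = true := by simp [hac]
      simp [hac]
    · have hf : (([a][0]?) == some c) = false := by simp [hac]
      simp [hac]
  | succ n =>
    rw [rfind_go_succ, rfind_go_succ]
    have hd : (xs ++ [a]).drop (n + 1) = [a] := by
      rw [List.drop_append_of_le_length (by omega), List.drop_eq_nil_of_le (by omega)]; rfl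
    have hd2 : xs.drop (n + 1) = [] := List.drop_eq_nil_of_le (by omega)
    rw [hd, hd2, isPrefixOf_singleton, isPrefixOf_singleton]
    rw [show ((List.nil (α := Char))[0]? == some c) = false from rfl]
    simp only [Bool.false_eq_true, if_false]
    by_cases hac : a = c
    · have ht : (([a][0]?) == some c) = true := by simp [hac]
      simp only [ht, if_true]
      rw [if_pos hac]
      push_cast
      ring
    · have hf : (([a][0]?) == some c) = false := by simp [hac]
      simp only [hf, Bool.false_eq_true, if_false]
      rw [if_neg hac]
      exact rfind_go_snoc _ _ _ _ (by omega)

lemma rfind_lt_length (xs : List Char) (c : Char) :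
    PySem.Chars.rfind xs [c] < (xs.length : Int) := by
  induction xs using List.reverseRecOn with
  | nil => rw [rfind_nil]; simp
  | append_singleton t a ih =>
    rw [rfind_snoc]
    by_cases h : a = c
    · simp [h]
    · simp [h]; omega

-- the decision B makes on a left segment
def segDecide (seg : List Char) : Bool :=
  decide (PySem.Chars.rfind seg ['p'] > max (PySem.Chars.rfind seg ['X']) (PySem.Chars.rfind seg ['@']))

lemma segDecide_snoc (xs : List Char) (a : Char) :
    segDecide (xs ++ [a]) =
      if a = 'p' then true else if a = 'X' ∨ a = '@' then false else segDecide xs := by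
  have hp := rfind_lt_length xs 'p'
  have hX := rfind_lt_length xs 'X'
  have hA := rfind_lt_length xs '@'
  unfold segDecide
  rw [rfind_snoc, rfind_snoc, rfind_snoc]
  by_cases h1 : a = 'p'
  · simp only [h1, if_true]
    have : ('p' : Char) ≠ 'X' := by decide
    have h2 : ('p' : Char) ≠ '@' := by decide
    simp only [if_neg this, if_neg h2]
    simp; omega
  · by_cases h2 : a = 'X'
    · subst h2
      simp only [if_neg h1, if_true]
      simp; omega
    · by_cases h3 : a = '@'
      · subst h3
        simp only [if_neg h1, if_neg h2, if_true]
        simp; omega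
      · simp [h1, h2, h3]

lemma isCL_go_neg (castle_map : List String) (r i : Int) (hi : i < 0) :
    isCL_go castle_map r i = false := by
  rw [isCL_go, dif_neg (by omega)]

lemma isCL_go_step (castle_map : List String) (r : Int) (row : String)
    (hrow : PySem.List.pyGet? castle_map r = some row) (i : Nat)
    (hi : i < row.toList.length) :
    isCL_go castle_map r (i : Int) =
      (if row.toList[i] = 'p' then true
       else if row.toList[i] = 'X' ∨ row.toList[i] = '@' then false
       else isCL_go castle_map r ((i : Int) - 1)) := by
  rw [isCL_go, dif_pos (by omega)]
  simp [hrow, List.getElem?_eq_getElem hi]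

lemma main_lemma (castle_map : List String) (r : Int) (row : String)
    (hrow : PySem.List.pyGet? castle_map r = some row) :
    ∀ (i : Nat), i < row.toList.length →
      isCL_go castle_map r (i : Int) = segDecide (row.toList.take (i + 1)) := by
  intro i
  induction i with
  | zero =>
    intro hi
    rw [isCL_go_step castle_map r row hrow 0 hi]
    have htake : row.toList.take (0 + 1) = row.toList.take 0 ++ [row.toList[0]] := by
      rw [List.take_add_one, List.getElem?_eq_getElem hi]; rfl
    rw [htake, segDecide_snoc]
    simp only [List.take_zero]
    have : isCL_go castle_map r ((0 : Nat) - 1 : Int) = false := isCL_go_neg _ _ _ (by omega)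
    rw [this]
    have : segDecide [] = false := by decide
    rw [this]
  | succ j ih =>
    intro hi
    rw [isCL_go_step castle_map r row hrow (j + 1) hi]
    have htake : row.toList.take (j + 1 + 1) = row.toList.take (j + 1) ++ [row.toList[j + 1]] := by
      rw [List.take_add_one, List.getElem?_eq_getElem hi]; rfl
    rw [htake, segDecide_snoc]
    have hcast : ((j + 1 : Nat) : Int) - 1 = (j : Int) := by push_cast; ring
    rw [hcast, ih (by omega)]

-- ===== VERDICT (by name: the statement is the Claim_ definition above) =====
theorem is_conflict_left_spec : Claim_equal_is_conflict_left := by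
  unfold Claim_equal_is_conflict_left
  intro castle_map tp _hdom hpre
  unfold Spec_is_conflict_left
  obtain ⟨r, c⟩ := tp
  by_cases hc : c ≤ 0
  · unfold is_conflict_left is_conflict_left_alt
    simp only [if_pos hc]
    exact isCL_go_neg _ _ _ (by omega)
  · rcases hpre with hpre | ⟨hin, hle⟩
    · exact absurd hpre hc
    · obtain ⟨row, hrow⟩ : ∃ row, PySem.List.pyGet? castle_map r = some row := by
        cases h : PySem.List.pyGet? castle_map r with
        | none => exact absurd ((PySem.List.pyGet?_eq_none_iff _ _).mp h) (not_not_intro hin)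
        | some row => exact ⟨row, rfl⟩
      have hgetD : PySem.List.pyGetD castle_map r "" = row := by
        unfold PySem.List.pyGetD; rw [hrow]; rfl
      rw [hgetD] at hle
      have hc1 : 1 ≤ c := by omega
      have hlen : (1 : Int) ≤ (row.toList.length : Int) := le_trans hc1 hle
      set i : Nat := (c - 1).toNat with hidef
      have hci : (i : Int) = c - 1 := Int.toNat_of_nonneg (by omega)
      have hilt : i < row.toList.length := by omega
      unfold is_conflict_left is_conflict_left_alt
      simp only [if_neg hc, hrow]
      rw [show (c - 1 : Int) = (i : Int) from hci.symm, main_lemma castle_map r row hrow i hilt]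
      rw [PySem.List.slice_to row.toList (by omega : (0:Int) ≤ c)]
      have : c.toNat = i + 1 := by omega
      rw [this]
      rfl
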